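-- pv_equiv track=rewrite | github.com/shunosuga/mdc | src/bert_training/restoration_tester.py | restore_identifiers
-- ===== SOURCE A (Python) =====
-- def restore_identifiers(tokens: list[str], labels: list[int]) -> list[str]:
--     """
--     Restore data identifiers from tokenized predictions.
--
--     Args:
--         tokens: BERT tokenizer output tokens
--         labels: Binary labels (0=normal, 1=data_identifier)
--
--     Returns:
--         List of restored data identifiers
--
--     Example:
--         Input:
--             tokens = ["Data", "under", "GS", "##E", "##12345", "and", "SR", "##R123456"]
--             labels = [0, 0, 1, 1, 1, 0, 1, 1]
--
--         Output:
--             ["GSE12345", "SRR123456"]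
--     """
--     identifiers = []
--     current_tokens = []
--
--     for token, label in zip(tokens, labels):
--         if label == 1:  # Binary label: 1 indicates data identifier
--             current_tokens.append(token)
--         else:
--             if current_tokens:
--                 # Reconstruct identifier from subword tokens
--                 identifier = reconstruct_from_subwords(current_tokens)
--                 if identifier:  # Only add non-empty identifiers
--                     identifiers.append(identifier)
--                 current_tokens = []
--
--     # Handle case where sequence ends with label 1
--     if current_tokens:
--         identifier = reconstruct_from_subwords(current_tokens)
--         if identifier:
--             identifiers.append(identifier)
--
--     return identifiers
--
-- def reconstruct_from_subwords(tokens: list[str]) -> str: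
--     """
--     Reconstruct original text from BERT subword tokens.
--
--     Args:
--         tokens: List of BERT tokens (may include ## prefixes)
--
--     Returns:
--         Reconstructed text string
--
--     Example:
--         Input: ["GS", "##E", "##12345"]
--         Output: "GSE12345"
--     """
--     if not tokens:
--         return ""
--
--     text = ""
--     for token in tokens:
--         if token.startswith("##"):
--             text += token[2:]  # Remove ## prefix
--         else:
--             text += token
--
--     return text.strip()
-- ===== SOURCE B (Python) =====
-- def restore_identifiers(tokens: list[str], labels: list[int]) -> list[str]:
--     """Run-scanner re-implementation: split the zipped stream into maximal
--     label==1 runs with an index two-pointer scan (no rolling buffer, no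
--     post-loop flush), build each identifier by joining the de-##-ed tokens."""
--     pairs = list(zip(tokens, labels))
--     n = len(pairs)
--     out = []
--     i = 0
--     while i < n:
--         if pairs[i][1] == 1:
--             j = i
--             while j < n and pairs[j][1] == 1:
--                 j += 1
--             ident = "".join(t[2:] if t.startswith("##") else t for t, _ in pairs[i:j]).strip()
--             if ident:
--                 out.append(ident)
--             i = j
--         else:
--             i += 1
--     return out
-- ===== Notes on version B (the rewrite author's own statement) =====
-- stated objective: alternative
-- what changed: Replaces A's rolling current_tokens buffer with its post-loop flush by a two-pointer run scanner: each maximal label==1 run is located, its identifier built by joining the de-'##'-ed tokens of the run slice, stripped, and appended if non-empty.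
import Mathlib
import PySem

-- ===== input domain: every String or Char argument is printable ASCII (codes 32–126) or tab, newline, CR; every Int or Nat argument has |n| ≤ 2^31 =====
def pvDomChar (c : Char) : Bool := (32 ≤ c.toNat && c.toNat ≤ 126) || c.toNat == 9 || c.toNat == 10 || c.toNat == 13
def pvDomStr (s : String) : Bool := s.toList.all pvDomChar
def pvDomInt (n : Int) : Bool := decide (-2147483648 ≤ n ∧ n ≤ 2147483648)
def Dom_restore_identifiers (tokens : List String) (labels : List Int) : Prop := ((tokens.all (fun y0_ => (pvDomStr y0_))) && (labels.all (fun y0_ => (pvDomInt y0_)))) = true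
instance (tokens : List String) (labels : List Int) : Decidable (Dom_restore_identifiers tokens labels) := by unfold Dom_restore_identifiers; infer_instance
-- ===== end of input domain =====

-- B replaces A's rolling buffer + post-loop flush by a run scanner over maximal label==1 runs (alternative decomposition, same cost).


-- ===== PORT A =====
-- helper reconstruct_from_subwords, transliterated: empty guard, fold with text += piece, final strip
def pvRecon (tokens : List String) : String :=
  if tokens = [] then ""
  else
    PySem.Str.strip (tokens.foldl (fun text token =>
      if PySem.Str.startswith token "##" then text ++ PySem.Str.slice token (some 2) none
      else text ++ token) "")

-- the main loop of A: state (identifiers, current_tokens); base case = the post-loop flush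
def pvLoopA : List (String × Int) → List String → List String → List String
  | [], identifiers, current =>
    if current ≠ [] then
      let ident := pvRecon current
      if ident ≠ "" then identifiers ++ [ident] else identifiers
    else identifiers
  | (token, label) :: rest, identifiers, current =>
    if label = 1 then pvLoopA rest identifiers (current ++ [token])
    else if current ≠ [] then
      let ident := pvRecon current
      pvLoopA rest (if ident ≠ "" then identifiers ++ [ident] else identifiers) []
    else pvLoopA rest identifiers current

def restore_identifiers (tokens : List String) (labels : List Int) : List String :=
  pvLoopA (tokens.zip labels) [] []

-- ===== PORT B =====
-- identifier of one run: join the de-##-ed tokens, then strip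
def pvRunIdent (run : List String) : String :=
  PySem.Str.strip (PySem.Str.join "" (run.map (fun t =>
    if PySem.Str.startswith t "##" then PySem.Str.slice t (some 2) none else t)))

-- run scanner: each maximal label==1 run is taken off the front in one step
def pvScan : List (String × Int) → List String
  | [] => []
  | (token, label) :: rest =>
    if label = 1 then
      let run := token :: (rest.takeWhile (fun p => p.2 = 1)).map Prod.fst
      let ident := pvRunIdent run
      (if ident ≠ "" then [ident] else []) ++ pvScan (rest.dropWhile (fun p => p.2 = 1))
    else pvScan rest
termination_by l => l.length
decreasing_by
  · have := List.length_dropWhile_le (p := fun (p : String × Int) => decide (p.2 = 1)) (l := rest)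
    simp; omega
  · simp

def restore_identifiers_alt (tokens : List String) (labels : List Int) : List String :=
  pvScan (tokens.zip labels)

-- ===== PRECONDITION & SPEC =====
def Spec_restore_identifiers (tokens : List String) (labels : List Int) (out : List String) : Prop := out = restore_identifiers_alt tokens labels
instance (tokens : List String) (labels : List Int) (out : List String) : Decidable (Spec_restore_identifiers tokens labels out) := by unfold Spec_restore_identifiers; infer_instance

-- ===== CLAIM (what is proved, stated in full; the proofs are below) =====
def Claim_equal_restore_identifiers : Prop := ∀ (tokens : List String) (labels : List Int), Dom_restore_identifiers tokens labels → Spec_restore_identifiers tokens labels (restore_identifiers tokens labels)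

-- ===== LEMMAS AND PROOFS =====

-- the emission a run produces
def pvEmit (run : List String) : List String :=
  if pvRunIdent run ≠ "" then [pvRunIdent run] else []

lemma pvJoin_empty_cons (x : String) (xs : List String) :
    PySem.Str.join "" (x :: xs) = x ++ PySem.Str.join "" xs := by
  have h : (PySem.Str.join "" (x :: xs)).toList = (x ++ PySem.Str.join "" xs).toList := by
    simp [PySem.Str.toList_join]
    cases xs with
    | nil => simp [PySem.Chars.join_singleton, PySem.Chars.join_nil]
    | cons y ys => simp [PySem.Chars.join_cons_cons]
  exact String.toList_injective h

lemma pvFoldl_chunk (run : List String) (acc : String) :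
    run.foldl (fun text token =>
      if PySem.Str.startswith token "##" then text ++ PySem.Str.slice token (some 2) none
      else text ++ token) acc
    = acc ++ PySem.Str.join "" (run.map (fun t =>
        if PySem.Str.startswith t "##" then PySem.Str.slice t (some 2) none else t)) := by
  induction run generalizing acc with
  | nil =>
    have h0 : PySem.Str.join "" ([] : List String) = "" := by decide
    simp [h0]
  | cons t ts ih =>
    simp only [List.foldl_cons, List.map_cons, pvJoin_empty_cons]
    rw [ih]
    split_ifs <;> simp [String.append_assoc]

lemma pvRecon_eq (run : List String) : pvRecon run = pvRunIdent run := by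
  unfold pvRecon pvRunIdent
  by_cases h : run = []
  · subst h; decide
  · rw [if_neg h, pvFoldl_chunk]
    simp

lemma pvEmit_nil : pvEmit [] = [] := by
  decide

lemma pvScan_cons_ne (t : String) (l : Int) (rest : List (String × Int)) (hl : ¬ l = 1) :
    pvScan ((t, l) :: rest) = pvScan rest := by
  conv_lhs => rw [pvScan]
  simp [hl]

-- pvScan consumes one maximal run at a time (trivially true when the head run is empty)
lemma pvScan_run (pairs : List (String × Int)) :
    pvScan pairs
      = pvEmit ((pairs.takeWhile (fun p => p.2 = 1)).map Prod.fst)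
        ++ pvScan (pairs.dropWhile (fun p => p.2 = 1)) := by
  cases pairs with
  | nil => simp [pvScan, pvEmit_nil]
  | cons p rest =>
    obtain ⟨t, l⟩ := p
    by_cases hl : l = 1
    · subst hl
      rw [pvScan]
      simp [pvEmit]
    · rw [pvScan_cons_ne t l rest hl]
      simp [hl, pvEmit_nil, pvScan_cons_ne t l rest hl]

-- the loop invariant: A's loop from state (ids, cur) produces ids, then the run cur is part of, then the scan of the rest
lemma pvLoopA_eq (pairs : List (String × Int)) (ids cur : List String) :
    pvLoopA pairs ids cur
      = ids ++ pvEmit (cur ++ (pairs.takeWhile (fun p => p.2 = 1)).map Prod.fst)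
          ++ pvScan (pairs.dropWhile (fun p => p.2 = 1)) := by
  induction pairs generalizing ids cur with
  | nil =>
    simp only [pvLoopA, List.takeWhile_nil, List.map_nil, List.append_nil, List.dropWhile_nil, pvScan]
    by_cases hc : cur = []
    · subst hc; simp [pvEmit_nil]
    · rw [if_pos hc, pvRecon_eq]
      unfold pvEmit
      split_ifs <;> simp
  | cons p rest ih =>
    obtain ⟨t, l⟩ := p
    by_cases hl : l = 1
    · subst hl
      rw [pvLoopA, if_pos rfl, ih]
      simp [List.append_assoc]
    · by_cases hc : cur = []
      · subst hc
        rw [pvLoopA, if_neg hl, if_neg (by simp), ih]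
        simp only [List.nil_append]
        rw [List.append_assoc, ← pvScan_run rest]
        simp [hl, pvEmit_nil, pvScan_cons_ne t l rest hl]
      · rw [pvLoopA, if_neg hl, if_pos hc, ih, pvRecon_eq]
        simp only [List.nil_append]
        rw [List.append_assoc, ← pvScan_run rest]
        by_cases he : pvRunIdent cur = "" <;>
          simp [hl, pvScan_cons_ne t l rest hl, pvEmit, he]

-- ===== VERDICT (by name: the statement is the Claim_ definition above) =====
theorem restore_identifiers_spec : Claim_equal_restore_identifiers := by
  intro tokens labels _
  unfold Spec_restore_identifiers restore_identifiers restore_identifiers_alt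
  rw [pvLoopA_eq, pvScan_run (tokens.zip labels)]
  simp
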